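-- pv_equiv track=rewrite | github.com/kanebenjamin/raid_boss | raid_boss/boss.py | get_attack_hint
-- ===== SOURCE A (Python) =====
-- def get_attack_hint(num_list):
--     result = []
--     EMRAKUL_TEXT = (
--         "An unsettling energy eminates from the moon... "
--     )
--     ZOMBIE_TEXT = "The ground begins to open at Lunar Channeler's feet."
--     CHANNEL_TEXT = "Lunar Channeler begins chanting at the moon."
--     ATTACK_TEXT = "Lunar Channeler is conjuring entities."
--     CHANNEL_LIST = [1,4,5,6]
--     ATTACK_LIST = [2,3,7,8,9]
--     EMRAKUL_LIST = [10]
--     ZOMBIE_LIST = [0]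
--     for num in num_list:
--         if num in CHANNEL_LIST:
--             if CHANNEL_TEXT not in result:
--                 result.append(CHANNEL_TEXT)
--         if num in ATTACK_LIST:
--             if ATTACK_TEXT not in result:
--                 result.append(ATTACK_TEXT)
--         if num in EMRAKUL_LIST:
--             if EMRAKUL_TEXT not in result:
--                 result.append(EMRAKUL_TEXT)
--         if num in ZOMBIE_LIST:
--             if ZOMBIE_TEXT not in result:
--                 result.append(ZOMBIE_TEXT)
--     return " ".join(result) + "\n"
-- ===== SOURCE B (Python) =====
-- def get_attack_hint(num_list):
--     EMRAKUL_TEXT = (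
--         "An unsettling energy eminates from the moon... "
--     )
--     ZOMBIE_TEXT = "The ground begins to open at Lunar Channeler's feet."
--     CHANNEL_TEXT = "Lunar Channeler begins chanting at the moon."
--     ATTACK_TEXT = "Lunar Channeler is conjuring entities."
--     CATS = [
--         ([1, 4, 5, 6], CHANNEL_TEXT),
--         ([2, 3, 7, 8, 9], ATTACK_TEXT),
--         ([10], EMRAKUL_TEXT),
--         ([0], ZOMBIE_TEXT),
--     ]
--     found = []
--     for members, text in CATS:
--         for i, num in enumerate(num_list):
--             if num in members:
--                 found.append((i, text))
--                 break
--     found.sort(key=lambda p: p[0])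
--     return " ".join(text for _, text in found) + "\n"
-- ===== Notes on version B (the rewrite author's own statement) =====
-- stated objective: alternative
-- what changed: Instead of one pass appending texts while testing 'text not in result' for dedup, B scans the list once per category for the first index where a member of that category appears, sorts the found (index, text) pairs by index, and joins the texts.
import Mathlib
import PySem

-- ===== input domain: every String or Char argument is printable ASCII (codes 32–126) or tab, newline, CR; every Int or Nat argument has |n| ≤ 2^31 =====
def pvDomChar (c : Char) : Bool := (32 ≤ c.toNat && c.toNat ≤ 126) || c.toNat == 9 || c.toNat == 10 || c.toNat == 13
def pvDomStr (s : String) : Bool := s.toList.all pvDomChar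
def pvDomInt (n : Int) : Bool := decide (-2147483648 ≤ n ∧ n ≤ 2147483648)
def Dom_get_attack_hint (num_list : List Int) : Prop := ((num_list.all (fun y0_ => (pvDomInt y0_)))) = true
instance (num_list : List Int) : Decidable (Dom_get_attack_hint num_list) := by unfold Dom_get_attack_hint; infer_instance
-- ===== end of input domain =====

-- B re-implements A by per-category first-occurrence scans + a sort by first index, instead of A's
-- single appending pass with in-result dedup; equal output on all inputs (objective: alternative).

-- ===== PORT A =====
def EMRAKUL_TEXT : String := "An unsettling energy eminates from the moon... "
def ZOMBIE_TEXT : String := "The ground begins to open at Lunar Channeler's feet."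
def CHANNEL_TEXT : String := "Lunar Channeler begins chanting at the moon."
def ATTACK_TEXT : String := "Lunar Channeler is conjuring entities."

-- the body of A's for-loop, transcribed branch for branch
def stepA (result0 : List String) (num : Int) : List String :=
  let result1 := if num ∈ ([1,4,5,6] : List Int) then
      (if CHANNEL_TEXT ∈ result0 then result0 else result0 ++ [CHANNEL_TEXT]) else result0
  let result2 := if num ∈ ([2,3,7,8,9] : List Int) then
      (if ATTACK_TEXT ∈ result1 then result1 else result1 ++ [ATTACK_TEXT]) else result1
  let result3 := if num ∈ ([10] : List Int) then
      (if EMRAKUL_TEXT ∈ result2 then result2 else result2 ++ [EMRAKUL_TEXT]) else result2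
  if num ∈ ([0] : List Int) then
      (if ZOMBIE_TEXT ∈ result3 then result3 else result3 ++ [ZOMBIE_TEXT]) else result3

def get_attack_hint (num_list : List Int) : String :=
  PySem.Str.join " " (num_list.foldl stepA []) ++ "\n"

-- ===== PORT B =====
-- Source B's inner 'for i, num in enumerate(num_list): if num in members: append; break'
def firstHit (members : List Int) (text : String) : List (Int × Int) → Option (Int × String)
  | [] => none
  | (i, num) :: rest => if num ∈ members then some (i, text) else firstHit members text rest

-- one step of Source B's outer loop: record the category's first hit, if any
def stepB (num_list : List Int) (found : List (Int × String)) (mt : List Int × String) : List (Int × String) :=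
  match firstHit mt.1 mt.2 (PySem.List.enumerate num_list) with
  | some p => found ++ [p]
  | none => found

def get_attack_hint_alt (num_list : List Int) : String :=
  let cats : List (List Int × String) :=
    [([1,4,5,6], CHANNEL_TEXT), ([2,3,7,8,9], ATTACK_TEXT), ([10], EMRAKUL_TEXT), ([0], ZOMBIE_TEXT)]
  let found := cats.foldl (stepB num_list) ([] : List (Int × String))
  let sortedFound := PySem.List.sorted found (fun p => p.1) false
  PySem.Str.join " " (sortedFound.map (fun p => p.2)) ++ "\n"

-- ===== PRECONDITION & SPEC =====
def Spec_get_attack_hint (num_list : List Int) (out : String) : Prop := out = get_attack_hint_alt num_list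
instance (num_list : List Int) (out : String) : Decidable (Spec_get_attack_hint num_list out) := by unfold Spec_get_attack_hint; infer_instance

-- ===== CLAIM (what is proved, stated in full; the proofs are below) =====
def Claim_equal_get_attack_hint : Prop := ∀ (num_list : List Int), Dom_get_attack_hint num_list → Spec_get_attack_hint num_list (get_attack_hint num_list)

-- ===== LEMMAS AND PROOFS =====

-- the category (0=channel, 1=attack, 2=emrakul, 3=zombie) a number triggers, if any
def catOf (n : Int) : Option Nat :=
  if n ∈ ([1,4,5,6] : List Int) then some 0
  else if n ∈ ([2,3,7,8,9] : List Int) then some 1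
  else if n ∈ ([10] : List Int) then some 2
  else if n ∈ ([0] : List Int) then some 3
  else none

def textOf : Nat → String
  | 0 => CHANNEL_TEXT
  | 1 => ATTACK_TEXT
  | 2 => EMRAKUL_TEXT
  | _ => ZOMBIE_TEXT

-- first-occurrence order of the categories present in l
def ordR : List Int → List Nat
  | [] => []
  | n :: t => match catOf n with
      | some c => c :: (ordR t).filter (fun c' => c' ≠ c)
      | none => ordR t

lemma mem_channel_iff (n : Int) : n ∈ ([1,4,5,6] : List Int) ↔ catOf n = some 0 := by
  unfold catOf; split_ifs with h1 h2 h3 h4 <;> simp_all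
lemma mem_attack_iff (n : Int) : n ∈ ([2,3,7,8,9] : List Int) ↔ catOf n = some 1 := by
  unfold catOf; split_ifs with h1 h2 h3 h4 <;> simp_all <;> omega
lemma mem_emrakul_iff (n : Int) : n ∈ ([10] : List Int) ↔ catOf n = some 2 := by
  unfold catOf; split_ifs with h1 h2 h3 h4 <;> simp_all <;> omega
lemma mem_zombie_iff (n : Int) : n ∈ ([0] : List Int) ↔ catOf n = some 3 := by
  unfold catOf; split_ifs with h1 h2 h3 h4 <;> simp_all <;> omega

lemma stepA_eq (r : List String) (n : Int) :
    stepA r n = match catOf n with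
      | some c => if textOf c ∈ r then r else r ++ [textOf c]
      | none => r := by
  have hle : ∀ c, catOf n = some c → c ≤ 3 := by
    intro c hc; unfold catOf at hc; split_ifs at hc <;> simp_all <;> omega
  rcases hc : catOf n with _ | c
  · simp only [stepA, mem_channel_iff, mem_attack_iff, mem_emrakul_iff, mem_zombie_iff, hc]
    simp
  · have h3 := hle c hc
    simp only [stepA, mem_channel_iff, mem_attack_iff, mem_emrakul_iff, mem_zombie_iff, hc,
      Option.some.injEq]
    interval_cases c <;> simp [textOf]

lemma textOf_inj {a b : Nat} (ha : a ≤ 3) (hb : b ≤ 3) (h : textOf a = textOf b) : a = b := by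
  interval_cases a <;> interval_cases b <;> simp_all [textOf] <;> (revert h; decide)

lemma ordR_le3 {c : Nat} {l : List Int} (h : c ∈ ordR l) : c ≤ 3 := by
  induction l with
  | nil => simp [ordR] at h
  | cons n t ih =>
    unfold ordR at h
    rcases hc : catOf n with _ | c0 <;> rw [hc] at h
    · exact ih h
    · have hle : c0 ≤ 3 := by unfold catOf at hc; split_ifs at hc <;> simp_all <;> omega
      rcases List.mem_cons.1 h with h | h
      · omega
      · exact ih (List.mem_of_mem_filter h)

lemma foldA_eq (l : List Int) (r : List String) :
    l.foldl stepA r = r ++ ((ordR l).filter (fun c => textOf c ∉ r)).map textOf := by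
  induction l generalizing r with
  | nil => simp [ordR]
  | cons n t ih =>
    rw [List.foldl_cons, stepA_eq]
    unfold ordR
    rcases hc : catOf n with _ | c
    · simp [ih]
    · have hcle : c ≤ 3 := by unfold catOf at hc; split_ifs at hc <;> simp_all <;> omega
      dsimp only
      by_cases hm : textOf c ∈ r
      · rw [if_pos hm, ih]
        congr 2
        rw [List.filter_cons, if_neg (by simp [hm]), List.filter_filter]
        apply List.filter_congr
        intro x hx
        have hx3 : x ≤ 3 := ordR_le3 hx
        by_cases hxc : x = c
        · subst hxc; simp [hm]
        · simp [hxc]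
      · rw [if_neg hm, ih]
        rw [List.filter_cons, if_pos (by simp [hm])]
        simp only [List.map_cons, List.filter_filter, List.append_assoc, List.singleton_append]
        congr 2
        congr 1
        apply List.filter_congr
        intro x hx
        have hx3 : x ≤ 3 := ordR_le3 hx
        by_cases hxc : x = c
        · subst hxc; simp
        · have hne : textOf x ≠ textOf c := fun h => hxc (textOf_inj hx3 hcle h)
          simp [hne, hxc]

-- ---------- B side ----------
def pcat (c : Nat) : Int → Bool := fun n => decide (catOf n = some c)
def idxC (c : Nat) (l : List Int) : Nat := List.findIdx (pcat c) l
def catPair (l : List Int) : Nat → Int × String := fun c => ((idxC c l : Int), textOf c)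
def occList (l : List Int) : List Nat := List.filter (fun c => l.any (pcat c)) [0,1,2,3]

lemma firstHit_enum (members : List Int) (text : String) (l : List Int) (s : Int) :
    firstHit members text (PySem.List.enumerate l s)
      = (List.findIdx? (fun n => decide (n ∈ members)) l).map (fun (i : Nat) => (s + (i : Int), text)) := by
  induction l generalizing s with
  | nil => simp [firstHit, PySem.List.enumerate_nil]
  | cons n t ih =>
    rw [PySem.List.enumerate_cons, List.findIdx?_cons]
    by_cases hn : n ∈ members
    · simp [firstHit, hn]
    · rw [if_neg (by simpa using hn)]
      have : firstHit members text ((s, n) :: PySem.List.enumerate t (s + 1))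
          = firstHit members text (PySem.List.enumerate t (s + 1)) := by
        simp [firstHit, hn]
      rw [this, ih, Option.map_map]
      congr 1
      funext i
      simp only [Function.comp_apply]
      congr 1
      push_cast
      ring

lemma foldl_stepB (l : List Int) (cs : List (List Int × String)) (acc : List (Int × String)) :
    cs.foldl (stepB l) acc
      = acc ++ cs.filterMap (fun mt => firstHit mt.1 mt.2 (PySem.List.enumerate l)) := by
  induction cs generalizing acc with
  | nil => simp
  | cons c cs ih =>
    rw [List.foldl_cons, List.filterMap_cons]
    cases hf : firstHit c.1 c.2 (PySem.List.enumerate l) <;> simp [stepB, hf, ih]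

lemma mem_ordR {c : Nat} {l : List Int} : c ∈ ordR l ↔ ∃ n ∈ l, catOf n = some c := by
  induction l with
  | nil => simp [ordR]
  | cons n t ih =>
    unfold ordR
    rcases hc : catOf n with _ | c0
    · rw [ih]
      constructor
      · rintro ⟨m, hm, hcm⟩; exact ⟨m, List.mem_cons_of_mem _ hm, hcm⟩
      · rintro ⟨m, hm, hcm⟩
        rcases List.mem_cons.1 hm with rfl | hm
        · rw [hc] at hcm; cases hcm
        · exact ⟨m, hm, hcm⟩
    · simp only [List.mem_cons, List.mem_filter, ih, decide_eq_true_eq]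
      constructor
      · rintro (rfl | ⟨⟨m, hm, hcm⟩, _⟩)
        · exact ⟨n, Or.inl rfl, hc⟩
        · exact ⟨m, Or.inr hm, hcm⟩
      · rintro ⟨m, hm, hcm⟩
        rcases hm with rfl | hm
        · rw [hc] at hcm; cases hcm; exact Or.inl rfl
        · by_cases hcc : c = c0
          · exact Or.inl hcc
          · exact Or.inr ⟨⟨m, hm, hcm⟩, hcc⟩

lemma ordR_nodup (l : List Int) : (ordR l).Nodup := by
  induction l with
  | nil => simp [ordR]
  | cons n t ih =>
    unfold ordR
    rcases catOf n with _ | c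
    · exact ih
    · refine List.Nodup.cons ?_ (List.Nodup.filter _ ih)
      intro hmem
      have := (List.mem_filter.1 hmem).2
      simp at this

lemma ordR_perm_occ (l : List Int) : (ordR l).Perm (occList l) := by
  have h4 : ([0,1,2,3] : List Nat).Nodup := by decide
  refine (List.perm_ext_iff_of_nodup (ordR_nodup l) (List.Nodup.filter _ h4)).mpr ?_
  intro c
  rw [mem_ordR]
  simp only [List.mem_filter, List.any_eq_true, decide_eq_true_eq, pcat]
  constructor
  · rintro ⟨n, hn, hcn⟩
    have hc3 : c ≤ 3 := by unfold catOf at hcn; split_ifs at hcn <;> simp_all <;> omega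
    refine ⟨?_, n, hn, ?_⟩
    · simp only [List.mem_cons, List.not_mem_nil, or_false]; omega
    · simp [hcn]
  · rintro ⟨_, n, hn, hcn⟩
    exact ⟨n, hn, by simpa using hcn⟩

lemma filterMap_eq_map_occ (l : List Int) (cs : List Nat) :
    List.filterMap (fun c => (List.findIdx? (pcat c) l).map (fun (i : Nat) => ((i : Int), textOf c))) cs
      = (cs.filter (fun c => l.any (pcat c))).map (catPair l) := by
  induction cs with
  | nil => simp
  | cons c cs ih =>
    rw [List.filterMap_cons, List.filter_cons]
    cases hf : List.findIdx? (pcat c) l with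
    | none =>
      have hany : l.any (pcat c) = false := by
        have := List.findIdx?_isSome (p := pcat c) (xs := l)
        rw [hf] at this; simpa using this.symm
      rw [hany]
      simpa using ih
    | some i =>
      have hidx := (List.findIdx?_eq_some_iff_findIdx_eq.1 hf).2
      have hany : l.any (pcat c) = true := by
        have := List.findIdx?_isSome (p := pcat c) (xs := l)
        rw [hf] at this; simpa using this.symm
      rw [hany]
      simp only [Option.map_some, if_true, List.map_cons]
      rw [ih]
      simp [catPair, idxC, hidx]

lemma idxC_cons_of_false {c : Nat} {n : Int} {t : List Int} (h : pcat c n = false) :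
    idxC c (n :: t) = idxC c t + 1 := by
  simp [idxC, List.findIdx_cons, h]

lemma ordR_pairwise (l : List Int) :
    (ordR l).Pairwise (fun a b => idxC a l < idxC b l) := by
  induction l with
  | nil => simp [ordR]
  | cons n t ih =>
    unfold ordR
    rcases hc : catOf n with _ | c
    · refine ih.imp_of_mem ?_
      intro a b _ _ hab
      have ha : pcat a n = false := by simp [pcat, hc]
      have hb : pcat b n = false := by simp [pcat, hc]
      rw [idxC_cons_of_false ha, idxC_cons_of_false hb]
      omega
    · have hcn : pcat c n = true := by simp [pcat, hc]
      refine List.Pairwise.cons ?_ ?_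
      · intro b hb
        have hbc : b ≠ c := by simpa using (List.mem_filter.1 hb).2
        have hbn : pcat b n = false := by
          simp only [pcat, hc, decide_eq_false_iff_not]
          intro hh
          injection hh with h
          exact hbc h.symm
        rw [idxC_cons_of_false hbn]
        simp [idxC, List.findIdx_cons, hcn]
      · refine (ih.filter _).imp_of_mem ?_
        intro a b ha hb hab
        have hac : a ≠ c := by simpa using (List.mem_filter.1 ha).2
        have hbc : b ≠ c := by simpa using (List.mem_filter.1 hb).2
        have han : pcat a n = false := by
          simp only [pcat, hc, decide_eq_false_iff_not]
          intro hh; injection hh with h; exact hac h.symm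
        have hbn : pcat b n = false := by
          simp only [pcat, hc, decide_eq_false_iff_not]
          intro hh; injection hh with h; exact hbc h.symm
        rw [idxC_cons_of_false han, idxC_cons_of_false hbn]
        omega

theorem get_attack_hint_spec : Claim_equal_get_attack_hint := by
  intro l _
  unfold Spec_get_attack_hint get_attack_hint get_attack_hint_alt
  dsimp only
  -- A side
  rw [foldA_eq]
  simp only [List.not_mem_nil, not_false_iff, decide_true, List.filter_true, List.nil_append]
  -- B side
  rw [foldl_stepB]
  have e0 : (fun n : Int => decide (n ∈ ([1,4,5,6] : List Int))) = pcat 0 :=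
    funext fun n => by simp only [pcat]; exact decide_eq_decide.mpr (mem_channel_iff n)
  have e1 : (fun n : Int => decide (n ∈ ([2,3,7,8,9] : List Int))) = pcat 1 :=
    funext fun n => by simp only [pcat]; exact decide_eq_decide.mpr (mem_attack_iff n)
  have e2 : (fun n : Int => decide (n ∈ ([10] : List Int))) = pcat 2 :=
    funext fun n => by simp only [pcat]; exact decide_eq_decide.mpr (mem_emrakul_iff n)
  have e3 : (fun n : Int => decide (n ∈ ([0] : List Int))) = pcat 3 :=
    funext fun n => by simp only [pcat]; exact decide_eq_decide.mpr (mem_zombie_iff n)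
  have hfm : List.filterMap
      (fun mt : List Int × String => firstHit mt.1 mt.2 (PySem.List.enumerate l))
      [([1,4,5,6], CHANNEL_TEXT), ([2,3,7,8,9], ATTACK_TEXT), ([10], EMRAKUL_TEXT), ([0], ZOMBIE_TEXT)]
      = List.filterMap (fun c => (List.findIdx? (pcat c) l).map (fun (i : Nat) => ((i : Int), textOf c))) [0,1,2,3] := by
    simp only [List.filterMap_cons, List.filterMap_nil, firstHit_enum, e0, e1, e2, e3]
    norm_num [textOf]
  rw [hfm, filterMap_eq_map_occ,
    show List.filter (fun c => l.any (pcat c)) [0,1,2,3] = occList l from rfl]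
  have hsorted : PySem.List.sorted ((occList l).map (catPair l)) (fun p => p.1) false
      = (ordR l).map (catPair l) := by
    refine PySem.List.sorted_eq_of_perm_of_pairwise_lt _ _ _
      ((ordR_perm_occ l).map _) ?_
    rw [List.pairwise_map]
    refine (ordR_pairwise l).imp ?_
    intro a b hab
    simpa [catPair] using (by exact_mod_cast hab : ((idxC a l : Int)) < (idxC b l : Int))
  simp only [List.nil_append, hsorted, List.map_map]
  rfl
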